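-- pv_equiv track=rewrite | github.com/Aashiq-Edavalapati/Data-Structures-and-Algorithms | Patterns/Dynamic Programming/DP_on_Subsequences_or_Subsets/_05_Count_Partitions_with_given_difference/_1_Recursion.py | countPartitionsWithGivenDiff
-- ===== SOURCE A (Python) =====
-- from typing import List
--
-- def countPartitionsWithGivenDiff(arr: List[int], diff: int) -> int:
--     n = len(arr)
--     target = diff + sum(arr)
--     if target % 2 == 1: # If (diff + SUM(arr)) is not even, then it means the partition does not exist at all because S1 is (diff + SUM(arr)) / 2 and all the elements are integers, so S1 should be an integer
--         return 0
--     target //= 2 # S1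
--
--     def countSubsetWithGivenSum(idx: int, target: int) -> int:
--         # Base Cases
--         if target == 0: return 1 # If target sum achieved, increase count
--         if idx == 0: return 1 if arr[0] == target else 0 # If idx == 0 => target sum achieved only if target == arr[0] or target == 0
--         if target < 0: return 0 # Already exceeded target sum, so not valid partition!
--
--         pick = 0
--         if arr[idx] != 0:
--             # Choice 1: Pick the current element
--             pick = countSubsetWithGivenSum(idx - 1, target - arr[idx])
--         # Choice 2: Don't pick the current element
--         notPick = countSubsetWithGivenSum(idx - 1, target)
--
--         # Return the total count in both the paths
--         return pick + notPick
--
--     zeros = 0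
--     for num in arr:
--         if num == 0: zeros += 1
--     combos = 2 ** zeros
--     return countSubsetWithGivenSum(n - 1, target) * combos
-- ===== SOURCE B (Python) =====
-- from typing import List
--
-- def countPartitionsWithGivenDiff(arr: List[int], diff: int) -> int:
--     n = len(arr)
--     target = diff + sum(arr)
--     if target % 2 == 1:
--         return 0
--     target //= 2
--
--     memo = {}
--
--     def count(idx: int, t: int) -> int:
--         if t == 0: return 1
--         if idx == 0: return 1 if arr[0] == t else 0
--         if t < 0: return 0
--         key = (idx, t)
--         if key in memo:
--             return memo[key]
--         pick = count(idx - 1, t - arr[idx]) if arr[idx] != 0 else 0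
--         notPick = count(idx - 1, t)
--         res = pick + notPick
--         memo[key] = res
--         return res
--
--     return count(n - 1, target) * (2 ** arr.count(0))
-- ===== Notes on version B (the rewrite author's own statement) =====
-- stated objective: alternative
-- what changed: Replaces A's naive exponential recursion with dynamic programming: the same recurrence is evaluated top-down with a memo dictionary keyed by (idx, target), so each state is computed at most once; the zero-count loop becomes arr.count(0).
import Mathlib
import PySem

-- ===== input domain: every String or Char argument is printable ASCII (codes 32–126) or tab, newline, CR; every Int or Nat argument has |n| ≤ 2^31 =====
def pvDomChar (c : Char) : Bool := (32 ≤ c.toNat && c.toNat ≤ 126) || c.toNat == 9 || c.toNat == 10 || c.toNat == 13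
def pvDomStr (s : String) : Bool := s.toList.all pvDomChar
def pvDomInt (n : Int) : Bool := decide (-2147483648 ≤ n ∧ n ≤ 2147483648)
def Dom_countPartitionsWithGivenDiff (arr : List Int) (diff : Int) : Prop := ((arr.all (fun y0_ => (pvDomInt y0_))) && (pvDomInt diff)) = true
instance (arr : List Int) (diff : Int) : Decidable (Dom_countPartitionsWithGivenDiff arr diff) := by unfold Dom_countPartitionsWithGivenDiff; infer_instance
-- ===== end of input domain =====

-- B evaluates A's recurrence by dynamic programming: a memo dictionary keyed by
-- (idx, target) caches each state, so every state is computed at most once.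

-- ===== PORT A =====
-- countSubsetWithGivenSum; `fuel` only makes the Int-indexed recursion total:
-- it never runs out when fuel > idx ≥ 0 (the base cases come first, as in Python).
-- arr[idx] is ported as pyGetD (default never used under Pre_: 0 ≤ idx < arr.length there).
def pvGoA (arr : List Int) (fuel : Nat) (idx t : Int) : Int :=
  if t = 0 then 1
  else if idx = 0 then (if PySem.List.pyGetD arr 0 0 = t then 1 else 0)
  else if t < 0 then 0
  else
    match fuel with
    | 0 => 0
    | f + 1 =>
      let a := PySem.List.pyGetD arr idx 0
      (if a ≠ 0 then pvGoA arr f (idx - 1) (t - a) else 0) + pvGoA arr f (idx - 1) t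

def countPartitionsWithGivenDiff (arr : List Int) (diff : Int) : Int :=
  let n := PySem.List.len arr
  let target := diff + arr.sum
  if PySem.Int.mod target 2 = 1 then 0
  else
    let target2 := PySem.Int.floordiv target 2
    let zeros := arr.foldl (fun z num => if num = 0 then z + 1 else z) (0 : Int)
    let combos := (2 : Int) ^ zeros.toNat
    pvGoA arr n.toNat (n - 1) target2 * combos

-- ===== PORT B =====
-- memoized count; the memo is threaded through the recursion (Python's mutable dict).
def pvGoB (arr : List Int) (fuel : Nat) (idx t : Int)
    (memo : PySem.Dict (Int × Int) Int) : Int × PySem.Dict (Int × Int) Int :=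
  if t = 0 then (1, memo)
  else if idx = 0 then ((if PySem.List.pyGetD arr 0 0 = t then 1 else 0), memo)
  else if t < 0 then (0, memo)
  else
    match memo.get? (idx, t) with
    | some v => (v, memo)
    | none =>
      match fuel with
      | 0 => (0, memo)
      | f + 1 =>
        let a := PySem.List.pyGetD arr idx 0
        let p1 := if a ≠ 0 then pvGoB arr f (idx - 1) (t - a) memo else (0, memo)
        let p2 := pvGoB arr f (idx - 1) t p1.2
        let res := p1.1 + p2.1
        (res, p2.2.insert (idx, t) res)

def countPartitionsWithGivenDiff_alt (arr : List Int) (diff : Int) : Int :=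
  let n := PySem.List.len arr
  let target := diff + arr.sum
  if PySem.Int.mod target 2 = 1 then 0
  else
    let target2 := PySem.Int.floordiv target 2
    (pvGoB arr n.toNat (n - 1) target2 PySem.Dict.empty).1
      * (2 : Int) ^ (arr.count 0)

-- ===== PRECONDITION & SPEC =====
-- A (and B) raise IndexError exactly when arr = [] and diff is even and positive
-- (the recursion then evaluates arr[-1] on the empty list); Pre_ excludes only those inputs.
def Pre_countPartitionsWithGivenDiff (arr : List Int) (diff : Int) : Prop :=
  arr ≠ [] ∨ PySem.Int.mod diff 2 = 1 ∨ diff ≤ 0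
instance (arr : List Int) (diff : Int) : Decidable (Pre_countPartitionsWithGivenDiff arr diff) := by unfold Pre_countPartitionsWithGivenDiff; infer_instance
def pvWitness_countPartitionsWithGivenDiff : List Int × Int := ([5, 2, 6, 4], 3)

def Spec_countPartitionsWithGivenDiff (arr : List Int) (diff : Int) (out : Int) : Prop := out = countPartitionsWithGivenDiff_alt arr diff
instance (arr : List Int) (diff : Int) (out : Int) : Decidable (Spec_countPartitionsWithGivenDiff arr diff out) := by unfold Spec_countPartitionsWithGivenDiff; infer_instance

-- ===== CLAIM (what is proved, stated in full; the proofs are below) =====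
def Claim_equal_countPartitionsWithGivenDiff : Prop := ∀ (arr : List Int) (diff : Int), Dom_countPartitionsWithGivenDiff arr diff → Pre_countPartitionsWithGivenDiff arr diff → Spec_countPartitionsWithGivenDiff arr diff (countPartitionsWithGivenDiff arr diff)

-- ===== LEMMAS AND PROOFS =====

-- one unfolding step of pvGoA in the recursive case.
theorem pvGoA_step (arr : List Int) (f : Nat) (idx t : Int)
    (ht0 : ¬ t = 0) (hi0 : ¬ idx = 0) (htn : ¬ t < 0) :
    pvGoA arr (f + 1) idx t
      = (if PySem.List.pyGetD arr idx 0 ≠ 0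
           then pvGoA arr f (idx - 1) (t - PySem.List.pyGetD arr idx 0) else 0)
        + pvGoA arr f (idx - 1) t := by
  conv_lhs => rw [pvGoA]
  simp only [if_neg ht0, if_neg hi0, if_neg htn]

-- pvGoA does not depend on the fuel as long as it exceeds idx.
theorem pvGoA_fuel (arr : List Int) : ∀ (fuel : Nat) (idx t : Int), 0 ≤ idx → idx.toNat < fuel →
    pvGoA arr fuel idx t = pvGoA arr (idx.toNat + 1) idx t := by
  intro fuel
  induction fuel with
  | zero => intro idx t h1 h2; omega
  | succ f ih =>
    intro idx t h1 h2
    by_cases ht0 : t = 0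
    · simp [pvGoA, ht0]
    by_cases hi0 : idx = 0
    · simp [pvGoA, ht0, hi0]
    by_cases htn : t < 0
    · simp [pvGoA, ht0, hi0, htn]
    have hrw : idx.toNat + 1 = (idx - 1).toNat + 1 + 1 := by omega
    rw [hrw, pvGoA_step arr f idx t ht0 hi0 htn,
        pvGoA_step arr ((idx - 1).toNat + 1) idx t ht0 hi0 htn,
        ih (idx - 1) (t - PySem.List.pyGetD arr idx 0) (by omega) (by omega),
        ih (idx - 1) t (by omega) (by omega)]

-- the memo invariant: every stored value is the plain recursion's value at its key.
def pvInv (arr : List Int) (memo : PySem.Dict (Int × Int) Int) : Prop :=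
  ∀ p v, memo.get? p = some v → v = pvGoA arr (p.1.toNat + 1) p.1 p.2

theorem pvGoB_correct (arr : List Int) : ∀ (fuel : Nat) (idx t : Int)
    (memo : PySem.Dict (Int × Int) Int), 0 ≤ idx → idx.toNat < fuel → pvInv arr memo →
    (pvGoB arr fuel idx t memo).1 = pvGoA arr (idx.toNat + 1) idx t ∧
      pvInv arr (pvGoB arr fuel idx t memo).2 := by
  intro fuel
  induction fuel with
  | zero => intro idx t memo h1 h2; omega
  | succ f ih =>
    intro idx t memo h1 h2 hinv
    by_cases ht0 : t = 0
    · constructor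
      · simp [pvGoB, pvGoA, ht0]
      · simpa [pvGoB, ht0] using hinv
    by_cases hi0 : idx = 0
    · constructor
      · simp [pvGoB, pvGoA, ht0, hi0]
      · simpa [pvGoB, ht0, hi0] using hinv
    by_cases htn : t < 0
    · constructor
      · simp [pvGoB, pvGoA, ht0, hi0, htn]
      · simpa [pvGoB, ht0, hi0, htn] using hinv
    have hidx1 : (1 : Int) ≤ idx := by omega
    cases hmg : memo.get? (idx, t) with
    | some v =>
      constructor
      · simp [pvGoB, ht0, hi0, htn, hmg]
        exact hinv (idx, t) v hmg
      · simpa [pvGoB, ht0, hi0, htn, hmg] using hinv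
    | none =>
      -- recursive case
      set a := PySem.List.pyGetD arr idx 0 with ha
      have h1' : (0 : Int) ≤ idx - 1 := by omega
      have h2' : (idx - 1).toNat < f := by omega
      have hp1 : (if a ≠ 0 then pvGoB arr f (idx - 1) (t - a) memo else (0, memo)).1
            = (if a ≠ 0 then pvGoA arr ((idx - 1).toNat + 1) (idx - 1) (t - a) else 0) ∧
          pvInv arr (if a ≠ 0 then pvGoB arr f (idx - 1) (t - a) memo else (0, memo)).2 := by
        by_cases haz : a ≠ 0
        · simpa [haz] using ih (idx - 1) (t - a) memo h1' h2' hinv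
        · simpa [haz] using hinv
      set p1 := if a ≠ 0 then pvGoB arr f (idx - 1) (t - a) memo else ((0 : Int), memo) with hp1def
      have hp2 := ih (idx - 1) t p1.2 h1' h2' hp1.2
      have hgoal : pvGoA arr (idx.toNat + 1) idx t
          = (if a ≠ 0 then pvGoA arr ((idx - 1).toNat + 1) (idx - 1) (t - a) else 0)
            + pvGoA arr ((idx - 1).toNat + 1) (idx - 1) t := by
        have hrw : idx.toNat + 1 = (idx - 1).toNat + 1 + 1 := by omega
        rw [hrw]
        simp only [pvGoA, if_neg ht0, if_neg hi0, if_neg htn, ← ha]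
      have hval : (pvGoB arr (f + 1) idx t memo).1 = pvGoA arr (idx.toNat + 1) idx t ∧
          (pvGoB arr (f + 1) idx t memo).2
            = (pvGoB arr f (idx - 1) t p1.2).2.insert (idx, t) (pvGoA arr (idx.toNat + 1) idx t) := by
        rw [hgoal]
        constructor
        · simp only [pvGoB, if_neg ht0, if_neg hi0, if_neg htn, hmg, ← ha, ← hp1def]
          rw [hp1.1, hp2.1]
        · simp only [pvGoB, if_neg ht0, if_neg hi0, if_neg htn, hmg, ← ha, ← hp1def]
          rw [hp1.1, hp2.1]
      refine ⟨hval.1, ?_⟩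
      rw [hval.2]
      intro p v hget
      rw [PySem.Dict.get?_insert] at hget
      by_cases hpk : p = (idx, t)
      · rw [if_pos hpk] at hget
        cases hget; rw [hpk]
      · rw [if_neg hpk] at hget
        exact hp2.2 p v hget

-- the zero-counting loop of A is List.count.
theorem pvZeros_eq (arr : List Int) :
    arr.foldl (fun z num => if num = 0 then z + 1 else z) (0 : Int) = (arr.count 0 : Int) := by
  have h : ∀ (l : List Int) (z : Int),
      l.foldl (fun z num => if num = 0 then z + 1 else z) z = z + (l.count 0 : Int) := by
    intro l
    induction l with
    | nil => intro z; simp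
    | cons x xs ihx =>
      intro z
      by_cases hx : x = 0
      · simp [List.foldl, hx, ihx]; ring
      · simp [List.foldl, hx, ihx]
  simpa using h arr 0

-- ===== VERDICT (by name: the statement is the Claim_ definition above) =====
theorem countPartitionsWithGivenDiff_spec : Claim_equal_countPartitionsWithGivenDiff := by
  unfold Claim_equal_countPartitionsWithGivenDiff
  intro arr diff _hdom hpre
  unfold Spec_countPartitionsWithGivenDiff countPartitionsWithGivenDiff countPartitionsWithGivenDiff_alt
  simp only [PySem.List.len_eq]
  by_cases hpar : PySem.Int.mod (diff + arr.sum) 2 = 1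
  · rw [if_pos hpar, if_pos hpar]
  · rw [if_neg hpar, if_neg hpar, pvZeros_eq]
    simp only [Int.toNat_natCast]
    cases arr with
    | nil =>
      -- empty list: Pre_ forces the halved target to be ≤ 0, so both sides take a base case
      simp only [List.sum_nil, add_zero] at hpar ⊢
      have hd : diff ≤ 0 := by
        rcases hpre with h | h | h
        · exact absurd rfl h
        · exact absurd h hpar
        · exact h
      have htle : PySem.Int.floordiv diff 2 ≤ 0 := by
        by_contra hc
        have h1 : (1 : Int) ≤ PySem.Int.floordiv diff 2 := by omega
        rw [PySem.Int.le_floordiv_iff_mul_le (by omega)] at h1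
        omega
      set t2 := PySem.Int.floordiv diff 2 with ht2
      by_cases ht0 : t2 = 0
      · simp [pvGoA, pvGoB, ht0]
      · have htn : t2 < 0 := by omega
        simp [pvGoA, pvGoB, ht0, htn, show ¬ ((-1 : Int) = 0) by decide]
    | cons x xs =>
      set arr' := x :: xs with harr
      set t2 := PySem.Int.floordiv (diff + arr'.sum) 2 with ht2
      have hlen : 0 < arr'.length := by simp [harr]
      have h1 : (0 : Int) ≤ (arr'.length : Int) - 1 := by omega
      have h2 : ((arr'.length : Int) - 1).toNat < arr'.length := by omega
      have hB := pvGoB_correct arr' arr'.length ((arr'.length : Int) - 1) t2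
        PySem.Dict.empty h1 h2 (by intro p v h; simp [PySem.Dict.get?_empty] at h)
      have hA := pvGoA_fuel arr' arr'.length ((arr'.length : Int) - 1) t2 h1 h2
      rw [hA, hB.1]
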